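-- pv_equiv track=rewrite | github.com/SimonSorcerer/advent-of-code | 2023/12/main.py | history_is_valid
-- ===== SOURCE A (Python) =====
-- SYMBOLS = {
--     'unknown': '?',
--     'broken': '#',
--     'fine': '.'
-- }
--
-- def history_is_valid(history, validation):
--     control_nums = []
--     broken_chain = 0
--
--     for char in history:
--         if char == SYMBOLS['broken']:
--             broken_chain += 1
--         elif char == SYMBOLS['fine']:
--             if broken_chain > 0:
--                 control_nums.append(broken_chain)
--                 broken_chain = 0
--         else:
--             return False
--     if broken_chain > 0:
--         control_nums.append(broken_chain)
--
--     return control_nums == validation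
-- ===== SOURCE B (Python) =====
-- def history_is_valid(history, validation):
--     # Validation-driven matcher: instead of extracting the run lengths from
--     # history and comparing the list, consume history against each expected
--     # run length in turn (runs are positive, so nonpositive targets never match).
--     if any(v <= 0 for v in validation):
--         return False
--     i, n = 0, len(history)
--     for v in validation:
--         while i < n and history[i] == '.':
--             i += 1
--         start = i
--         while i < n and history[i] == '#':
--             i += 1
--         if i - start != v:
--             return False
--     while i < n and history[i] == '.':
--         i += 1
--     return i == n
-- ===== Notes on version B (the rewrite author's own statement) =====
-- stated objective: alternative
-- what changed: Instead of scanning history to extract the list of '#'-run lengths and comparing it to validation, B iterates over validation and consumes history against each expected run length in turn (skip dots, measure one '#' run, require exact length), then requires only dots remain; nonpositive targets are rejected up front since runs are positive.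
import Mathlib
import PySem

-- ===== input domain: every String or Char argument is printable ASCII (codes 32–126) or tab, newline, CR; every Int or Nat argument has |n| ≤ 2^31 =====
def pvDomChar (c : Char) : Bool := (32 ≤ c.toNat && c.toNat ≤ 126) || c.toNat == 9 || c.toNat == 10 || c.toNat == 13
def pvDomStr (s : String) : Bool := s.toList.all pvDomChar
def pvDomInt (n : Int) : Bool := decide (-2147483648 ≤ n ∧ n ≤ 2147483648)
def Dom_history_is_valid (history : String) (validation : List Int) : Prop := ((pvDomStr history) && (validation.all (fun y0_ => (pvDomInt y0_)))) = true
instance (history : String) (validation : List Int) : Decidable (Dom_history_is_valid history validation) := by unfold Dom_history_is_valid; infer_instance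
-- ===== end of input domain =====

-- B replaces A's run-length extraction (accumulate broken_chain, flush into control_nums,
-- compare the list) by a validation-driven matcher that consumes history against each
-- expected run length in turn; alternative decomposition, same cost.


-- ===== PORT A =====
-- the loop over history: state = (control_nums, broken_chain); early `return False` = the `false` branch
def pvGoA (validation : List Int) : List Char → List Int → Int → Bool
  | [], nums, bc => (if bc > 0 then nums ++ [bc] else nums) == validation
  | c :: rest, nums, bc =>
    if c = '#' then pvGoA validation rest nums (bc + 1)
    else if c = '.' then
      if bc > 0 then pvGoA validation rest (nums ++ [bc]) 0
      else pvGoA validation rest nums bc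
    else false

def history_is_valid (history : String) (validation : List Int) : Bool :=
  pvGoA validation history.toList [] 0

-- ===== PORT B =====
-- `while i < n and history[i] == '.'` : the remainder after the leading '.' run
def pvSkipDots : List Char → List Char
  | [] => []
  | c :: rest => if c = '.' then pvSkipDots rest else c :: rest

-- `while i < n and history[i] == '#'` : (i - start, remainder)
def pvTakeHash : List Char → Nat × List Char
  | [] => (0, [])
  | c :: rest =>
    if c = '#' then let p := pvTakeHash rest; (p.1 + 1, p.2)
    else (0, c :: rest)

-- the `for v in validation` loop; the base case is the final dot-skip and `i == n`
def pvMatch : List Int → List Char → Bool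
  | [], cs => pvSkipDots cs = []
  | v :: vs, cs =>
    let cs1 := pvSkipDots cs
    let p := pvTakeHash cs1
    if (p.1 : Int) ≠ v then false else pvMatch vs p.2

def history_is_valid_alt (history : String) (validation : List Int) : Bool :=
  if validation.any (fun v => v ≤ 0) then false
  else pvMatch validation history.toList

-- ===== PRECONDITION & SPEC =====
def Spec_history_is_valid (history : String) (validation : List Int) (out : Bool) : Prop := out = history_is_valid_alt history validation
instance (history : String) (validation : List Int) (out : Bool) : Decidable (Spec_history_is_valid history validation out) := by unfold Spec_history_is_valid; infer_instance

-- ===== CLAIM (what is proved, stated in full; the proofs are below) =====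
def Claim_equal_history_is_valid : Prop := ∀ (history : String) (validation : List Int), Dom_history_is_valid history validation → Spec_history_is_valid history validation (history_is_valid history validation)

-- ===== LEMMAS AND PROOFS =====

theorem pvTakeHash_len_le (cs : List Char) : (pvTakeHash cs).2.length ≤ cs.length := by
  induction cs with
  | nil => simp [pvTakeHash]
  | cons c rest ih =>
    by_cases h : c = '#'
    · subst h; simp [pvTakeHash]; omega
    · simp [pvTakeHash, h]

theorem pvSkipDots_len_le (cs : List Char) : (pvSkipDots cs).length ≤ cs.length := by
  induction cs with
  | nil => simp [pvSkipDots]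
  | cons c rest ih =>
    by_cases h : c = '.'
    · subst h; simp [pvSkipDots]; omega
    · simp [pvSkipDots, h]

-- proof-side characterisation of A's result: the list of maximal '#'-run lengths,
-- none if an invalid character occurs
def pvRuns? : List Char → Option (List Int)
  | [] => some []
  | c :: rest =>
    if c = '.' then pvRuns? rest
    else if c = '#' then
      (pvRuns? (pvTakeHash rest).2).map (fun l => ((pvTakeHash rest).1 + 1 : Int) :: l)
    else none
  termination_by cs => cs.length
  decreasing_by
    all_goals
      first
      | (simp; done)
      | (have := pvTakeHash_len_le rest; simp; omega)

-- consuming the leading '#' run in A just increments broken_chain by its length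
theorem pvGoA_span (v : List Int) (cs : List Char) (nums : List Int) (bc : Int) :
    pvGoA v cs nums bc = pvGoA v (pvTakeHash cs).2 nums (bc + (pvTakeHash cs).1) := by
  induction cs generalizing bc with
  | nil => simp [pvTakeHash]
  | cons c rest ih =>
    by_cases h : c = '#'
    · subst h
      simp only [pvTakeHash]
      simp [pvGoA, ih]
      ring_nf
    · simp [pvTakeHash, h]

-- the head of (pvTakeHash cs).2 is never '#'
theorem pvTakeHash_head (cs : List Char) :
    (pvTakeHash cs).2 = [] ∨ ∃ c rest, (pvTakeHash cs).2 = c :: rest ∧ c ≠ '#' := by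
  induction cs with
  | nil => left; rfl
  | cons c rest ih =>
    by_cases h : c = '#'
    · subst h
      simp only [pvTakeHash]
      exact ih
    · right
      exact ⟨c, rest, by simp [pvTakeHash, h], h⟩

-- A with accumulated nums and broken_chain 0 versus the run list
theorem pvAMain (v : List Int) :
    ∀ n cs, cs.length ≤ n → ∀ nums : List Int,
      pvGoA v cs nums 0 =
        match pvRuns? cs with
        | some runs => (nums ++ runs) == v
        | none => false := by
  intro n
  induction n with
  | zero =>
    intro cs hlen nums
    have : cs = [] := List.eq_nil_of_length_eq_zero (Nat.le_zero.mp hlen)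
    subst this
    simp [pvGoA, pvRuns?]
  | succ n ih =>
    intro cs hlen nums
    match cs with
    | [] => simp [pvGoA, pvRuns?]
    | c :: rest =>
      by_cases hd : c = '.'
      · subst hd
        rw [show pvRuns? ('.' :: rest) = pvRuns? rest from by simp [pvRuns?]]
        have := ih rest (by simpa using Nat.lt_succ_iff.mp (by simpa using hlen)) nums
        simpa [pvGoA] using this
      · by_cases hh : c = '#'
        · subst hh
          have hstep : pvGoA v ('#' :: rest) nums 0 = pvGoA v rest nums 1 := by
            simp [pvGoA]
          rw [hstep, pvGoA_span]
          have hrlen : (pvTakeHash rest).2.length ≤ n := by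
            have := pvTakeHash_len_le rest
            simp at hlen; omega
          have hruns : pvRuns? ('#' :: rest) =
              (pvRuns? (pvTakeHash rest).2).map (fun l => ((pvTakeHash rest).1 + 1 : Int) :: l) := by
            rw [pvRuns?]; simp
          rw [hruns]
          rcases pvTakeHash_head rest with he | ⟨c', rest', heq, hne⟩
          · rw [he]
            have heq1 : (1 + ((pvTakeHash rest).1 : Int)) = (((pvTakeHash rest).1 : Int) + 1) := by ring
            simp [pvGoA, pvRuns?, heq1]
          · rw [heq]
            by_cases hd' : c' = '.'
            · subst hd'
              have hbc : (1 + ((pvTakeHash rest).1 : Int)) > 0 := by positivity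
              have : pvGoA v ('.' :: rest') nums (1 + ((pvTakeHash rest).1 : Int)) =
                  pvGoA v rest' (nums ++ [1 + ((pvTakeHash rest).1 : Int)]) 0 := by
                simp [pvGoA, hbc]
              rw [this]
              have hlen' : rest'.length ≤ n := by
                have h2 := hrlen; rw [heq] at h2; simp at h2; omega
              rw [ih rest' hlen' (nums ++ [1 + ((pvTakeHash rest).1 : Int)])]
              rw [show pvRuns? ('.' :: rest') = pvRuns? rest' from by simp [pvRuns?]]
              cases pvRuns? rest' with
              | none => simp
              | some runs =>
                simp only [Option.map_some]
                have : nums ++ [1 + ((pvTakeHash rest).1 : Int)] ++ runs =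
                    nums ++ (((pvTakeHash rest).1 : Int) + 1) :: runs := by
                  simp; ring_nf
                rw [this]
            · have hA : pvGoA v (c' :: rest') nums (1 + ((pvTakeHash rest).1 : Int)) = false := by
                simp [pvGoA, hne, hd']
              have hB : pvRuns? (c' :: rest') = none := by
                rw [pvRuns?]; simp [hne, hd']
              rw [hA, hB]; simp
        · have hA : pvGoA v (c :: rest) nums 0 = false := by simp [pvGoA, hh, hd]
          have hB : pvRuns? (c :: rest) = none := by rw [pvRuns?]; simp [hh, hd]
          rw [hA, hB]

-- skipping leading dots does not change the run list
theorem pvRuns?_skipDots (cs : List Char) : pvRuns? (pvSkipDots cs) = pvRuns? cs := by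
  induction cs with
  | nil => rfl
  | cons c rest ih =>
    by_cases h : c = '.'
    · subst h
      rw [show pvRuns? ('.' :: rest) = pvRuns? rest from by simp [pvRuns?]]
      simpa [pvSkipDots] using ih
    · simp [pvSkipDots, h]

-- the run lengths are positive
theorem pvRuns?_pos : ∀ n cs, cs.length ≤ n → ∀ r, pvRuns? cs = some r → ∀ x ∈ r, 0 < x := by
  intro n
  induction n with
  | zero =>
    intro cs hlen r hr
    have : cs = [] := List.eq_nil_of_length_eq_zero (Nat.le_zero.mp hlen)
    subst this
    simp [pvRuns?] at hr
    subst hr; simp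
  | succ n ih =>
    intro cs hlen r hr
    match cs with
    | [] => simp [pvRuns?] at hr; subst hr; simp
    | c :: rest =>
      by_cases hd : c = '.'
      · subst hd
        rw [show pvRuns? ('.' :: rest) = pvRuns? rest from by simp [pvRuns?]] at hr
        exact ih rest (by simp at hlen; omega) r hr
      · by_cases hh : c = '#'
        · subst hh
          rw [show pvRuns? ('#' :: rest) =
              (pvRuns? (pvTakeHash rest).2).map (fun l => ((pvTakeHash rest).1 + 1 : Int) :: l)
              from by rw [pvRuns?]; simp] at hr
          cases hr2 : pvRuns? (pvTakeHash rest).2 with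
          | none => rw [hr2] at hr; simp at hr
          | some r2 =>
            rw [hr2] at hr
            simp at hr
            subst hr
            intro x hx
            rcases List.mem_cons.mp hx with h | h
            · subst h; positivity
            · exact ih (pvTakeHash rest).2
                (by have := pvTakeHash_len_le rest; simp at hlen; omega) r2 hr2 x h
        · rw [show pvRuns? (c :: rest) = none from by rw [pvRuns?]; simp [hd, hh]] at hr
          simp at hr

-- B's matcher versus the run list, for positive targets
theorem pvBMain : ∀ n cs, cs.length ≤ n → ∀ v : List Int, (∀ x ∈ v, 0 < x) →
    pvMatch v cs =
      match pvRuns? cs with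
      | some runs => runs == v
      | none => false := by
  intro n
  induction n with
  | zero =>
    intro cs hlen v hv
    have : cs = [] := List.eq_nil_of_length_eq_zero (Nat.le_zero.mp hlen)
    subst this
    cases v with
    | nil => simp [pvMatch, pvSkipDots, pvRuns?]
    | cons w vs =>
      have hw : 0 < w := hv w (by simp)
      simp [pvMatch, pvSkipDots, pvTakeHash, pvRuns?]
      omega
  | succ n ih =>
    intro cs hlen v hv
    rw [← pvRuns?_skipDots cs]
    have hlen1 : (pvSkipDots cs).length ≤ n + 1 := le_trans (pvSkipDots_len_le cs) hlen
    -- pvMatch also starts by skipping dots (in both branches)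
    have hmatch : pvMatch v cs = pvMatch v (pvSkipDots cs) := by
      cases v with
      | nil =>
        simp only [pvMatch]
        induction cs with
        | nil => rfl
        | cons c rest ihc =>
          by_cases h : c = '.'
          · subst h; simpa [pvSkipDots] using ihc (by simp at hlen ⊢; omega) (le_trans (pvSkipDots_len_le rest) (by simp at hlen; omega))
          · simp [pvSkipDots, h]
      | cons w vs =>
        simp only [pvMatch]
        have : pvSkipDots (pvSkipDots cs) = pvSkipDots cs := by
          induction cs with
          | nil => rfl
          | cons c rest ihc =>
            by_cases h : c = '.'
            · subst h; simpa [pvSkipDots] using ihc (by simp at hlen ⊢; omega) (le_trans (pvSkipDots_len_le rest) (by simp at hlen; omega))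
            · simp [pvSkipDots, h]
        rw [this]
    rw [hmatch]
    cases hcs1 : pvSkipDots cs with
    | nil =>
      cases v with
      | nil => simp [pvMatch, pvSkipDots, pvRuns?]
      | cons w vs =>
        have hw : 0 < w := hv w (by simp)
        simp [pvMatch, pvSkipDots, pvTakeHash, pvRuns?]
        omega
    | cons c rest =>
      have hnd : c ≠ '.' := by
        intro h; subst h
        -- head of pvSkipDots is never '.'
        have : ∀ ds, pvSkipDots ds ≠ '.' :: rest := by
          intro ds
          induction ds with
          | nil => simp [pvSkipDots]
          | cons d ds' ihd =>
            by_cases hdd : d = '.'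
            · subst hdd; simpa [pvSkipDots] using ihd
            · simp [pvSkipDots, hdd]
        exact this cs hcs1
      by_cases hh : c = '#'
      · subst hh
        have hruns : pvRuns? ('#' :: rest) =
            (pvRuns? (pvTakeHash rest).2).map (fun l => ((pvTakeHash rest).1 + 1 : Int) :: l) := by
          rw [pvRuns?]; simp
        rw [hruns]
        cases v with
        | nil =>
          simp only [pvMatch, pvSkipDots]
          cases pvRuns? (pvTakeHash rest).2 <;> simp
        | cons w vs =>
          have hvs : ∀ x ∈ vs, 0 < x := fun x hx => hv x (by simp [hx])
          have hlen2 : (pvTakeHash rest).2.length ≤ n := by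
            have h1 : ('#' :: rest).length ≤ n + 1 := hcs1 ▸ hlen1
            have := pvTakeHash_len_le rest
            simp at h1; omega
          have hth : pvTakeHash ('#' :: rest) =
              ((pvTakeHash rest).1 + 1, (pvTakeHash rest).2) := by
            simp [pvTakeHash]
          simp only [pvMatch, pvSkipDots, hth, if_neg (by decide : ¬ ('#' = '.'))]
          by_cases hwk : ((pvTakeHash rest).1 + 1 : Int) = w
          · simp only [hwk, ne_eq]
            rw [ih (pvTakeHash rest).2 hlen2 vs hvs]
            cases pvRuns? (pvTakeHash rest).2 with
            | none => simp [hwk]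
            | some r2 =>
              push_cast
              push_cast at hwk
              simp [hwk]
          · push_cast at hwk ⊢
            rw [if_pos hwk]
            cases pvRuns? (pvTakeHash rest).2 with
            | none => simp
            | some r2 => simp [hwk]
      · have hruns : pvRuns? (c :: rest) = none := by rw [pvRuns?]; simp [hnd, hh]
        rw [hruns]
        cases v with
        | nil => simp [pvMatch, pvSkipDots, hnd]
        | cons w vs =>
          have hw : 0 < w := hv w (by simp)
          simp [pvMatch, pvSkipDots, pvTakeHash, hnd, hh]
          omega

-- ===== VERDICT (by name: the statement is the Claim_ definition above) =====
theorem history_is_valid_spec : Claim_equal_history_is_valid := by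
  intro history validation _
  unfold Spec_history_is_valid history_is_valid history_is_valid_alt
  rw [pvAMain validation history.toList.length history.toList (le_refl _) []]
  by_cases hneg : validation.any (fun v => v ≤ 0)
  · rw [if_pos hneg]
    obtain ⟨x, hxmem, hx⟩ := List.any_eq_true.mp hneg
    simp at hx
    cases hr : pvRuns? history.toList with
    | none => simp
    | some r =>
      have hpos := pvRuns?_pos history.toList.length history.toList (le_refl _) r hr
      simp only [List.nil_append, beq_eq_false_iff_ne, ne_eq]
      intro h
      subst h
      exact absurd (hpos x hxmem) (by omega)
  · rw [if_neg hneg]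
    have hv : ∀ x ∈ validation, 0 < x := by
      intro x hx
      by_contra h
      exact hneg (List.any_eq_true.mpr ⟨x, hx, by simp; omega⟩)
    rw [pvBMain history.toList.length history.toList (le_refl _) validation hv]
    simp
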